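-- pv_equiv track=rewrite | github.com/OscarLigthart/Knowledge-Representation | Assignment1/testRecursion.py | update_problem
-- ===== SOURCE A (Python) =====
-- import copy
--
-- def update_problem(problem, variable, var_assignment):
--     """
--         updates the problem after variable is set to a certain value
--     """
--
--     new_problem = []
--
--     for clause in problem:
--         new_clause = copy.deepcopy(clause)
--         clause_satisfied = False
--         for literal in clause:
--
--             # if the variable appears in the clause
--             if abs(literal) == variable:
--
--                 # if the variable appears as a neg. literal
--                 if literal < 0:
--                     # and the variable is assigned to true, the outcome will be "not" true -> so false
--                     if var_assignment == True:
--                         # in that case the literal needs to be removed from the clause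
--                         new_clause.remove(literal)
--
--                     # however, if the variable is assigned to false, the outcome will be "not" false -> so true
--                     elif var_assignment == False:
--                         # in that case the clause is satisfied
--                         clause_satisfied = True
--                 # if the variable appears as a pos. literal
--                 else:
--
--                     # and the variable is assigned to true, the outcome will be true
--                     if var_assignment == True:
--                         # in that case the clause is satisfied
--                         clause_satisfied = True
--
--                     # however, if the variable is assigned to false, the outcome will be false
--                     if var_assignment == False:
--                         # in that case the literal needs to be removed from the clause
--                         new_clause.remove(literal)
--
--         # if the clause is not satisfied, it will remain in the problem
--         if not clause_satisfied:
--             new_problem.append(new_clause)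
--
--     return new_problem
-- ===== SOURCE B (Python) =====
-- def update_problem(problem, variable, var_assignment):
--     """
--         updates the problem after variable is set to a certain value
--         (rebuild instead of copy-and-delete: each clause is scanned once into a
--         fresh list; the scan short-circuits to None the moment a satisfying
--         literal is seen -- no deepcopy, no list.remove, no satisfied flag)
--     """
--     result = []
--     for clause in problem:
--         kept = []
--         for lit in clause:
--             if abs(lit) == variable:
--                 if (lit < 0) != var_assignment:
--                     kept = None   # clause satisfied: discard, stop scanning
--                     break
--                 # else: literal falsified, simply not carried over
--             else:
--                 kept.append(lit)
--         if kept is not None: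
--             result.append(kept)
--     return result
-- ===== Notes on version B (the rewrite author's own statement) =====
-- stated objective: simpler
-- what changed: A deepcopies every clause, mutates the copy with list.remove per falsified literal, tracks a satisfied flag through a four-way branch cascade and always scans the whole clause; B never copies or mutates: it rebuilds each clause by appending the kept literals to a fresh list and short-circuits (break, kept=None) the moment a satisfying literal is seen.
import Mathlib
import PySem

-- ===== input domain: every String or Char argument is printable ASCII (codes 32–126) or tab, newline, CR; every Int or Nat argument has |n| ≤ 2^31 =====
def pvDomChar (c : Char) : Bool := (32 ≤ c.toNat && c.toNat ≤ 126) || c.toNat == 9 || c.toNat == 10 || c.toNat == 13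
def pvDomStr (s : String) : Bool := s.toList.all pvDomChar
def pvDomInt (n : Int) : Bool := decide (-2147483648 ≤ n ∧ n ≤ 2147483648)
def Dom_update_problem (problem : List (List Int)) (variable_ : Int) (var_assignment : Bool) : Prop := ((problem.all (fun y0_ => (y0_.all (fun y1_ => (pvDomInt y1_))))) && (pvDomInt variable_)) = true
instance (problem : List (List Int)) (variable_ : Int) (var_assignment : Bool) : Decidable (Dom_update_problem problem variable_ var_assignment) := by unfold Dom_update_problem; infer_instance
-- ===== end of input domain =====

-- ===== PORT A =====
-- B rebuilds each clause with an early-exit scan instead of A's deepcopy + remove + flag pass (simpler: no copying, no mutation, no flag; return values only — neither version observably mutates its arguments).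
-- inner-loop body of A: state = (new_clause, clause_satisfied).
-- A's `new_clause.remove(literal)` never raises (the literal scanned is still present in
-- new_clause), so `(remove? ..).getD st.1` is exact; the `else st` arms are unreachable for Bool.
def pvStepA (variable_ : Int) (var_assignment : Bool) (st : List Int × Bool) (literal : Int) : List Int × Bool :=
  if |literal| = variable_ then
    if literal < 0 then
      if var_assignment = true then ((PySem.List.remove? st.1 literal).getD st.1, st.2)
      else if var_assignment = false then (st.1, true)
      else st
    else
      let st := if var_assignment = true then (st.1, true) else st
      if var_assignment = false then ((PySem.List.remove? st.1 literal).getD st.1, st.2) else st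
  else st

def update_problem (problem : List (List Int)) (variable_ : Int) (var_assignment : Bool) : List (List Int) :=
  problem.foldl (fun new_problem clause =>
    let st := clause.foldl (pvStepA variable_ var_assignment) (clause, false)
    if st.2 = false then new_problem ++ [st.1] else new_problem) []

-- ===== PORT B =====
-- Source B's inner loop over `clause`: accumulator `kept`; `none` = the Python `kept = None; break`.
def pvScanB (variable_ : Int) (var_assignment : Bool) (kept : List Int) : List Int → Option (List Int)
  | [] => some kept
  | lit :: rest =>
    if |lit| = variable_ then
      if (decide (lit < 0)) != var_assignment then none
      else pvScanB variable_ var_assignment kept rest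
    else pvScanB variable_ var_assignment (kept ++ [lit]) rest

def update_problem_alt (problem : List (List Int)) (variable_ : Int) (var_assignment : Bool) : List (List Int) :=
  problem.foldl (fun result clause =>
    match pvScanB variable_ var_assignment [] clause with
    | none => result
    | some kept => result ++ [kept]) []

-- ===== PRECONDITION & SPEC =====
def Spec_update_problem (problem : List (List Int)) (variable_ : Int) (var_assignment : Bool) (out : List (List Int)) : Prop := out = update_problem_alt problem variable_ var_assignment
instance (problem : List (List Int)) (variable_ : Int) (var_assignment : Bool) (out : List (List Int)) : Decidable (Spec_update_problem problem variable_ var_assignment out) := by unfold Spec_update_problem; infer_instance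

-- ===== CLAIM (what is proved, stated in full; the proofs are below) =====
def Claim_equal_update_problem : Prop := ∀ (problem : List (List Int)) (variable_ : Int) (var_assignment : Bool), Dom_update_problem problem variable_ var_assignment → Spec_update_problem problem variable_ var_assignment (update_problem problem variable_ var_assignment)

-- ===== LEMMAS AND PROOFS =====

-- proof-side characterisation of a "satisfying" / "falsified" literal
def pvSat (variable_ : Int) (var_assignment : Bool) (lit : Int) : Bool :=
  decide (|lit| = variable_) && (decide (lit < 0) != var_assignment)

def pvFals (variable_ : Int) (var_assignment : Bool) (lit : Int) : Bool :=
  decide (|lit| = variable_) && (decide (lit < 0) == var_assignment)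

-- common closed form both ports are proved equal to
def pvClosed (variable_ : Int) (var_assignment : Bool) (problem : List (List Int)) : List (List Int) :=
  (problem.filter (fun clause => !(clause.any (pvSat variable_ var_assignment)))).map
    (fun clause => clause.filter (fun lit => !(pvFals variable_ var_assignment lit)))

theorem remove_append_not_mem (xs ys : List Int) (v : Int) (h : v ∉ xs) :
    PySem.List.remove? (xs ++ v :: ys) v = some (xs ++ ys) := by
  induction xs with
  | nil => simp [PySem.List.remove?_cons_self]
  | cons x xs ih =>
      have hx : x ≠ v := fun e => h (e ▸ List.mem_cons_self)
      have h' : v ∉ xs := fun m => h (List.mem_cons_of_mem _ m)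
      rw [List.cons_append, PySem.List.remove?_cons_of_ne _ hx, ih h']
      rfl

-- one inner-loop step of A, expressed through the two predicates
theorem stepA_eq (v : Int) (a : Bool) (l : Int) (p s : List Int) :
    pvStepA v a (p.filter (fun t => !(pvFals v a t)) ++ l :: s, p.any (pvSat v a)) l
      = ((p ++ [l]).filter (fun t => !(pvFals v a t)) ++ s, (p ++ [l]).any (pvSat v a)) := by
  have hrem : pvFals v a l = true →
      PySem.List.remove? (p.filter (fun t => !(pvFals v a t)) ++ l :: s) l
        = some (p.filter (fun t => !(pvFals v a t)) ++ s) := by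
    intro hf
    refine remove_append_not_mem _ _ _ (fun hmem => ?_)
    have := (List.mem_filter.mp hmem).2
    rw [hf] at this
    exact absurd this (by simp)
  by_cases hm : |l| = v
  · cases a <;> by_cases hneg : l < 0
    · have hF : pvFals v false l = false := by simp [pvFals, hm, hneg]
      have hS : pvSat v false l = true := by simp [pvSat, hm, hneg]
      simp [pvStepA, hm, hneg, hF, hS, List.filter_append, List.any_append]
    · have hF : pvFals v false l = true := by simp [pvFals, hm, hneg]
      have hS : pvSat v false l = false := by simp [pvSat, hm, hneg]
      simp [pvStepA, hm, hneg, hrem hF, hF, hS, List.filter_append, List.any_append]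
    · have hF : pvFals v true l = true := by simp [pvFals, hm, hneg]
      have hS : pvSat v true l = false := by simp [pvSat, hm, hneg]
      simp [pvStepA, hm, hneg, hrem hF, hF, hS, List.filter_append, List.any_append]
    · have hF : pvFals v true l = false := by simp [pvFals, hm, hneg]
      have hS : pvSat v true l = true := by simp [pvSat, hm, hneg]
      simp [pvStepA, hm, hneg, hF, hS, List.filter_append, List.any_append]
  · simp [pvStepA, pvSat, pvFals, hm, List.filter_append, List.any_append]

-- invariant of A's inner loop
theorem inner_loop_inv (v : Int) (a : Bool) (s : List Int) : ∀ p : List Int,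
    s.foldl (pvStepA v a) (p.filter (fun t => !(pvFals v a t)) ++ s, p.any (pvSat v a))
      = ((p ++ s).filter (fun t => !(pvFals v a t)), (p ++ s).any (pvSat v a)) := by
  induction s with
  | nil => intro p; simp
  | cons l s ih =>
      intro p
      rw [List.foldl_cons, stepA_eq, ih (p ++ [l])]
      simp

theorem clause_fold (v : Int) (a : Bool) (clause : List Int) :
    clause.foldl (pvStepA v a) (clause, false)
      = (clause.filter (fun t => !(pvFals v a t)), clause.any (pvSat v a)) := by
  simpa using inner_loop_inv v a clause []

theorem A_outer (v : Int) (a : Bool) (problem : List (List Int)) : ∀ acc : List (List Int),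
    problem.foldl (fun new_problem clause =>
        let st := clause.foldl (pvStepA v a) (clause, false)
        if st.2 = false then new_problem ++ [st.1] else new_problem) acc
      = acc ++ pvClosed v a problem := by
  induction problem with
  | nil => intro acc; simp [pvClosed]
  | cons c problem ih =>
      intro acc
      rw [List.foldl_cons]
      show problem.foldl _ (if (c.foldl (pvStepA v a) (c, false)).2 = false then _ else _) = _
      rw [clause_fold]
      by_cases hs : c.any (pvSat v a) <;> simp [hs, ih, pvClosed, List.filter_cons]

-- B's inner scan in closed form
theorem scanB_eq (v : Int) (a : Bool) (clause : List Int) : ∀ kept : List Int,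
    pvScanB v a kept clause
      = if clause.any (pvSat v a) then none
        else some (kept ++ clause.filter (fun l => !(pvFals v a l))) := by
  induction clause with
  | nil => intro kept; simp [pvScanB]
  | cons l rest ih =>
      intro kept
      by_cases hm : |l| = v
      · by_cases hs : (decide (l < 0)) != a
        · have hS : pvSat v a l = true := by simp [pvSat, hm, hs]
          simp [pvScanB, hm, hs, hS]
        · have hs' : decide (l < 0) = a := by simpa using hs
          have hS : pvSat v a l = false := by simp [pvSat, hm, hs']
          have hF : pvFals v a l = true := by simp [pvFals, hm, hs']
          simp [pvScanB, hm, hs, ih, hS, hF, List.filter_cons]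
      · have hS : pvSat v a l = false := by simp [pvSat, hm]
        have hF : pvFals v a l = false := by simp [pvFals, hm]
        simp [pvScanB, hm, ih, hS, hF, List.filter_cons]

theorem B_outer (v : Int) (a : Bool) (problem : List (List Int)) : ∀ acc : List (List Int),
    problem.foldl (fun result clause =>
        match pvScanB v a [] clause with
        | none => result
        | some kept => result ++ [kept]) acc
      = acc ++ pvClosed v a problem := by
  induction problem with
  | nil => intro acc; simp [pvClosed]
  | cons c problem ih =>
      intro acc
      rw [List.foldl_cons]
      show List.foldl _ (match pvScanB v a [] c with
        | none => acc | some kept => acc ++ [kept]) problem = _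
      rw [scanB_eq]
      by_cases hs : c.any (pvSat v a)
      · rw [if_pos hs]
        simpa [pvClosed, List.filter_cons, hs] using ih acc
      · rw [if_neg hs]
        simpa [pvClosed, List.filter_cons, hs]
          using ih (acc ++ [List.filter (fun l => !pvFals v a l) c])

-- ===== VERDICT (by name: the statement is the Claim_ definition above) =====
theorem update_problem_spec : Claim_equal_update_problem := by
  intro problem v a _
  show update_problem problem v a = update_problem_alt problem v a
  unfold update_problem update_problem_alt
  rw [A_outer, B_outer]
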